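-- pv_equiv track=rewrite | github.com/MaciekMalec/music | music_reports1.py | remove_from_playlist
-- ===== SOURCE A (Python) =====
-- def remove_from_playlist(playlist,z):
--     temp_playlist=[]
--     i=1
--     if str.isdigit(z):
--         for item in playlist:
--             if i!=int(z):
--                 temp_playlist.append(item)
--             i+=1
--         playlist=temp_playlist
--     elif z=='c':
--         playlist=[]
--     return playlist
-- ===== SOURCE B (Python) =====
-- def remove_from_playlist(playlist, z):
--     if str.isdigit(z):
--         k = int(z)
--         if 1 <= k <= len(playlist):
--             return playlist[:k-1] + playlist[k:]
--         return playlist[:]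
--     if z == 'c':
--         return []
--     return playlist
-- ===== Notes on version B (the rewrite author's own statement) =====
-- stated objective: simpler
-- what changed: Replaces the counter-based element-by-element filtering loop with direct index arithmetic and two slices (playlist[:k-1] + playlist[k:]), removing the loop entirely.
import Mathlib
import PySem

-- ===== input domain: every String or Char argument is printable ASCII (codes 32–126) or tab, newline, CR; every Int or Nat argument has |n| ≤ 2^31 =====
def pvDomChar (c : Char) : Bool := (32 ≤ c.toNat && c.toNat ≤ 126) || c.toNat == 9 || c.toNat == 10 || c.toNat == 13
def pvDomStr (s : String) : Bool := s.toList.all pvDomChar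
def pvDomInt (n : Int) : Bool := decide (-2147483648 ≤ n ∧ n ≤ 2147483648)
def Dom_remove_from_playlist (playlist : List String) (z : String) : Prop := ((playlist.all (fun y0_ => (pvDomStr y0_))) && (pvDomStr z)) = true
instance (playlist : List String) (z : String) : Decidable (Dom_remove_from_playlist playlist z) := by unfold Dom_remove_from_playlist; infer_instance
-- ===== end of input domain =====

-- B replaces A's counter-based filtering loop by direct index arithmetic and two slices (simpler, same cost).


-- ===== PORT A =====
-- temp_playlist=[]; i=1; if z.isdigit(): loop appending items with i != int(z); elif z=='c': [].
-- int(z) is total here (z is all ASCII digits), ported as (ofStr? z).getD 0.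
def remove_from_playlist (playlist : List String) (z : String) : List String :=
  if PySem.Str.strIsdigit z then
    let n : Int := (PySem.Int.ofStr? z).getD 0
    (playlist.foldl
      (fun (st : List String × Int) item =>
        (if st.2 ≠ n then st.1 ++ [item] else st.1, st.2 + 1))
      ([], 1)).1
  else if z = "c" then [] else playlist

-- ===== PORT B =====
def remove_from_playlist_alt (playlist : List String) (z : String) : List String :=
  if PySem.Str.strIsdigit z then
    let k : Int := (PySem.Int.ofStr? z).getD 0
    if 1 ≤ k ∧ k ≤ playlist.length then
      PySem.List.slice playlist none (some (k - 1)) ++ PySem.List.slice playlist (some k) none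
    else
      PySem.List.slice playlist none none
  else if z = "c" then [] else playlist

-- ===== PRECONDITION & SPEC =====
def Spec_remove_from_playlist (playlist : List String) (z : String) (out : List String) : Prop := out = remove_from_playlist_alt playlist z
instance (playlist : List String) (z : String) (out : List String) : Decidable (Spec_remove_from_playlist playlist z out) := by unfold Spec_remove_from_playlist; infer_instance

-- ===== CLAIM (what is proved, stated in full; the proofs are below) =====
def Claim_equal_remove_from_playlist : Prop := ∀ (playlist : List String) (z : String), Dom_remove_from_playlist playlist z → Spec_remove_from_playlist playlist z (remove_from_playlist playlist z)

-- ===== LEMMAS AND PROOFS =====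

-- A's loop with counter starting at i removes exactly the element whose 1-based position equals n.
theorem rfp_loop (n : Int) :
    ∀ (xs : List String) (acc : List String) (i : Int),
      (xs.foldl
        (fun (st : List String × Int) item =>
          (if st.2 ≠ n then st.1 ++ [item] else st.1, st.2 + 1))
        (acc, i)).1
      = acc ++ (if i ≤ n ∧ n < i + xs.length then
                  xs.take (n - i).toNat ++ xs.drop ((n - i).toNat + 1)
                else xs) := by
  intro xs
  induction xs with
  | nil => intro acc i; simp
  | cons x xs ih =>
    intro acc i
    by_cases h : i = n
    · subst h
      simp only [List.foldl_cons, if_neg (by omega : ¬ (i ≠ i))]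
      rw [ih]
      have h1 : ¬ (i + 1 ≤ i ∧ i < i + 1 + (xs.length : Int)) := by omega
      have h2 : i ≤ i ∧ i < i + ((x :: xs).length : Int) := by
        constructor
        · omega
        · simp only [List.length_cons]; push_cast; omega
      rw [if_neg h1, if_pos h2]
      simp
    · simp only [List.foldl_cons, if_pos h]
      rw [ih]
      by_cases h2 : i + 1 ≤ n ∧ n < i + 1 + (xs.length : Int)
      · have h3 : i ≤ n ∧ n < i + ((x :: xs).length : Int) := by
          simp at h2 ⊢; omega
        rw [if_pos h2, if_pos h3]
        have hk : (n - i).toNat = (n - (i + 1)).toNat + 1 := by omega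
        simp [hk]
      · have h3 : ¬ (i ≤ n ∧ n < i + ((x :: xs).length : Int)) := by
          simp at h2 ⊢; intro _; omega
        rw [if_neg h2, if_neg h3]
        simp

-- ===== VERDICT (by name: the statement is the Claim_ definition above) =====
theorem remove_from_playlist_spec : Claim_equal_remove_from_playlist := by
  intro playlist z _
  unfold Spec_remove_from_playlist remove_from_playlist remove_from_playlist_alt
  by_cases hd : PySem.Str.strIsdigit z
  · simp only [hd, if_pos]
    set n : Int := (PySem.Int.ofStr? z).getD 0 with hn
    rw [rfp_loop n playlist [] 1]
    by_cases hb : 1 ≤ n ∧ n ≤ (playlist.length : Int)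
    · have hc : 1 ≤ n ∧ n < 1 + (playlist.length : Int) := by omega
      rw [if_pos hc, if_pos hb]
      rw [PySem.List.slice_to (b := n - 1) playlist (by omega),
          PySem.List.slice_from (a := n) playlist (by omega)]
      simp
      omega
    · have hc : ¬ (1 ≤ n ∧ n < 1 + (playlist.length : Int)) := by omega
      rw [if_neg hc, if_neg hb, PySem.List.slice_none_none]
      simp
  · rw [if_neg hd, if_neg hd]
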